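-- pv_equiv track=rewrite | github.com/Vijay-vj-007/karka-training | D23-20230724/assignment/EB_input_from_user.py | calculate_electricity_bill
-- ===== SOURCE A (Python) =====
-- def calculate_electricity_bill(consumer_data):
--     eb_reading=consumer_data["eb_reading"]
--
--     output=[]
--     Total_amount=0
--     for i in range(len(eb_reading)-1):
--         unit_consumed=eb_reading[i+1] - eb_reading[i]
--         month=i+1
--         bill=0
--         if unit_consumed <100:
--             bill=bill + 0
--             Total_amount+=0
--         elif unit_consumed >=100 and unit_consumed <200:
--             bill=bill+(2 * unit_consumed)
--             Total_amount+=(2* unit_consumed)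
--         elif unit_consumed >= 200 and unit_consumed <500:
--             bill=bill+(5 * unit_consumed)
--             Total_amount+=(5*unit_consumed)
--         elif unit_consumed >= 500 and unit_consumed <=1000:
--             bill=bill+(10 * unit_consumed)
--             Total_amount+=(10*unit_consumed)
--         elif unit_consumed > 1000:
--             bill=bill+(14 * unit_consumed)
--             Total_amount+=(14*unit_consumed)
--
--         result={"Month":month,
--                 "Unit_consumed":unit_consumed,
--                 "Bill_amount":bill,}
--         output.append(result)
--
--     return output,Total_amount
-- ===== SOURCE B (Python) =====
-- def calculate_electricity_bill(consumer_data):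
--     def rate(u):
--         # cumulative bracket increments: 0 -> +2 at 100 -> +3 at 200 -> +5 at 500 -> +4 above 1000
--         return 2*(u >= 100) + 3*(u >= 200) + 5*(u >= 500) + 4*(u > 1000)
--
--     def walk(readings, month):
--         if len(readings) < 2:
--             return [], 0
--         unit = readings[1] - readings[0]
--         bill = rate(unit) * unit
--         rows, total = walk(readings[1:], month + 1)
--         return [{"Month": month, "Unit_consumed": unit, "Bill_amount": bill}] + rows, bill + total
--
--     return walk(consumer_data["eb_reading"], 1)
-- ===== Notes on version B (the rewrite author's own statement) =====
-- stated objective: alternative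
-- what changed: A iterates with an index loop over range(len-1), a five-branch if/elif cascade duplicated for the bill and for a running total accumulator; B is a structural recursion over the readings list (no indices) that builds the rows front-to-back through the recursive call and threads the total up through the recursion, computing the rate as a sum of cumulative bracket increments (2,+3,+5,+4) instead of a branch cascade.
import Mathlib
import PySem

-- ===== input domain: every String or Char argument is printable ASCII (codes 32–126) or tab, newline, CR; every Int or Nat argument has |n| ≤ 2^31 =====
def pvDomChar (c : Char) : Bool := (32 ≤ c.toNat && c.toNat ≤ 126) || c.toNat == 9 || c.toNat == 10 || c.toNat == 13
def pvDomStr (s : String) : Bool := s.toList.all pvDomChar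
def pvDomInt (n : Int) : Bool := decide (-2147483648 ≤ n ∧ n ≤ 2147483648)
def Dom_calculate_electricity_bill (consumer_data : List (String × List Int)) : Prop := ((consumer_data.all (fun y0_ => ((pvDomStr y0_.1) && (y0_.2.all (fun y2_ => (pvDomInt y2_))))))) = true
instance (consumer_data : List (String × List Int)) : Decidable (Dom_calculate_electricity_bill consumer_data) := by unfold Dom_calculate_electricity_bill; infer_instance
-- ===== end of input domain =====

-- B replaces A's index loop with duplicated five-branch cascades by a structural recursion over the
-- readings list that threads the total up through the recursion and computes the rate as a sum of
-- cumulative bracket increments; return-value equivalence, same cost.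

-- ===== PORT A =====
def calculate_electricity_bill (consumer_data : List (String × List Int)) : (List (List (String × Int))) × Int :=
  let eb := ((PySem.Dict.mk consumer_data).get? "eb_reading").getD []
  (PySem.List.pyRange 0 ((eb.length : Int) - 1) 1).foldl
    (fun st i =>
      let unit : Int := PySem.List.pyGetD eb (i + 1) 0 - PySem.List.pyGetD eb i 0
      let month : Int := i + 1
      let bill : Int :=
        if unit < 100 then 0 + 0
        else if 100 ≤ unit ∧ unit < 200 then 0 + 2 * unit
        else if 200 ≤ unit ∧ unit < 500 then 0 + 5 * unit
        else if 500 ≤ unit ∧ unit ≤ 1000 then 0 + 10 * unit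
        else if 1000 < unit then 0 + 14 * unit
        else 0
      let ta : Int := st.2 +
        (if unit < 100 then 0
         else if 100 ≤ unit ∧ unit < 200 then 2 * unit
         else if 200 ≤ unit ∧ unit < 500 then 5 * unit
         else if 500 ≤ unit ∧ unit ≤ 1000 then 10 * unit
         else if 1000 < unit then 14 * unit
         else 0)
      (st.1 ++ [[("Month", month), ("Unit_consumed", unit), ("Bill_amount", bill)]], ta))
    ([], 0)

-- ===== PORT B =====
-- rate(u) = 2*(u>=100) + 3*(u>=200) + 5*(u>=500) + 4*(u>1000)
def pvRateB (u : Int) : Int :=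
  2 * (if 100 ≤ u then 1 else 0) + 3 * (if 200 ≤ u then 1 else 0)
    + 5 * (if 500 ≤ u then 1 else 0) + 4 * (if 1000 < u then 1 else 0)

-- walk(readings, month): recursion over the list; readings[1:] is the structural tail
def pvWalk : List Int → Int → (List (List (String × Int))) × Int
  | a :: b :: rest, month =>
      let unit : Int := b - a
      let bill : Int := pvRateB unit * unit
      let r := pvWalk (b :: rest) (month + 1)
      ([("Month", month), ("Unit_consumed", unit), ("Bill_amount", bill)] :: r.1, bill + r.2)
  | _, _ => ([], 0)

def calculate_electricity_bill_alt (consumer_data : List (String × List Int)) : (List (List (String × Int))) × Int :=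
  pvWalk (((PySem.Dict.mk consumer_data).get? "eb_reading").getD []) 1

-- ===== PRECONDITION & SPEC =====
-- Pre_: the dict must contain the key "eb_reading"; otherwise Python A raises KeyError.
def Pre_calculate_electricity_bill (consumer_data : List (String × List Int)) : Prop :=
  "eb_reading" ∈ consumer_data.map Prod.fst
instance (consumer_data : List (String × List Int)) : Decidable (Pre_calculate_electricity_bill consumer_data) := by unfold Pre_calculate_electricity_bill; infer_instance
def pvWitness_calculate_electricity_bill : (List (String × List Int)) := [("eb_reading", [100, 250, 400])]

def Spec_calculate_electricity_bill (consumer_data : List (String × List Int)) (out : (List (List (String × Int))) × Int) : Prop := out = calculate_electricity_bill_alt consumer_data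
instance (consumer_data : List (String × List Int)) (out : (List (List (String × Int))) × Int) : Decidable (Spec_calculate_electricity_bill consumer_data out) := by unfold Spec_calculate_electricity_bill; infer_instance

-- ===== CLAIM =====
def Claim_equal_calculate_electricity_bill : Prop := ∀ (consumer_data : List (String × List Int)), Dom_calculate_electricity_bill consumer_data → Pre_calculate_electricity_bill consumer_data → Spec_calculate_electricity_bill consumer_data (calculate_electricity_bill consumer_data)

-- ===== LEMMAS AND PROOFS =====

-- B's increment-sum rate times units equals A's bill cascade.
theorem pvRateB_mul (u : Int) :
    pvRateB u * u =
      (if u < 100 then 0 + 0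
       else if 100 ≤ u ∧ u < 200 then 0 + 2 * u
       else if 200 ≤ u ∧ u < 500 then 0 + 5 * u
       else if 500 ≤ u ∧ u ≤ 1000 then 0 + 10 * u
       else if 1000 < u then 0 + 14 * u
       else 0) := by
  unfold pvRateB
  by_cases h1 : (100 : Int) ≤ u <;> by_cases h2 : (200 : Int) ≤ u <;>
    by_cases h3 : (500 : Int) ≤ u <;> by_cases h4 : (1000 : Int) < u <;>
    simp [h1, h2, h3, h4] <;> (split_ifs <;> omega)

theorem pv_foldl_shape (l : List Int) (g : Int → List (String × Int)) (h : Int → Int)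
    (acc : List (List (String × Int))) (t : Int) :
    l.foldl (fun st i => (st.1 ++ [g i], st.2 + h i)) (acc, t)
      = (acc ++ l.map g, t + (l.map h).sum) := by
  induction l generalizing acc t with
  | nil => simp
  | cons x xs ih => simp [ih, add_assoc]

-- the per-month row and total-increment of A, as functions of the month index
def pvRow (eb : List Int) (i : Int) : List (String × Int) :=
  let unit : Int := PySem.List.pyGetD eb (i + 1) 0 - PySem.List.pyGetD eb i 0
  [("Month", i + 1), ("Unit_consumed", unit),
   ("Bill_amount",
     if unit < 100 then 0 + 0
     else if 100 ≤ unit ∧ unit < 200 then 0 + 2 * unit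
     else if 200 ≤ unit ∧ unit < 500 then 0 + 5 * unit
     else if 500 ≤ unit ∧ unit ≤ 1000 then 0 + 10 * unit
     else if 1000 < unit then 0 + 14 * unit
     else 0)]

def pvTot (eb : List Int) (i : Int) : Int :=
  let unit : Int := PySem.List.pyGetD eb (i + 1) 0 - PySem.List.pyGetD eb i 0
  if unit < 100 then 0
  else if 100 ≤ unit ∧ unit < 200 then 2 * unit
  else if 200 ≤ unit ∧ unit < 500 then 5 * unit
  else if 500 ≤ unit ∧ unit ≤ 1000 then 10 * unit
  else if 1000 < unit then 14 * unit
  else 0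

theorem pvA_eq (consumer_data : List (String × List Int)) :
    calculate_electricity_bill consumer_data =
      (let eb := ((PySem.Dict.mk consumer_data).get? "eb_reading").getD []
       ((PySem.List.pyRange 0 ((eb.length : Int) - 1) 1).map (pvRow eb),
        ((PySem.List.pyRange 0 ((eb.length : Int) - 1) 1).map (pvTot eb)).sum)) := by
  unfold calculate_electricity_bill
  have := pv_foldl_shape
      (PySem.List.pyRange 0 (((((PySem.Dict.mk consumer_data).get? "eb_reading").getD []).length : Int) - 1) 1)
      (pvRow (((PySem.Dict.mk consumer_data).get? "eb_reading").getD []))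
      (pvTot (((PySem.Dict.mk consumer_data).get? "eb_reading").getD [])) [] 0
  simpa [pvRow, pvTot] using this

-- B's recursion, characterised over the list of consecutive pairs
def pvRowOf (p : Int × (Int × Int)) : List (String × Int) :=
  [("Month", p.1), ("Unit_consumed", p.2.2 - p.2.1),
   ("Bill_amount", pvRateB (p.2.2 - p.2.1) * (p.2.2 - p.2.1))]

def pvBillOf (q : Int × Int) : Int := pvRateB (q.2 - q.1) * (q.2 - q.1)

theorem pvWalk_spec (eb : List Int) (m : Int) :
    pvWalk eb m = ((PySem.List.enumerate (eb.zip eb.tail) m).map pvRowOf,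
                   ((eb.zip eb.tail).map pvBillOf).sum) := by
  induction eb generalizing m with
  | nil => simp [pvWalk, PySem.List.enumerate_nil]
  | cons a t ih =>
    cases t with
    | nil => simp [pvWalk, PySem.List.enumerate_nil]
    | cons b rest =>
      simp only [pvWalk, ih (m + 1), List.tail_cons, List.zip_cons_cons,
        PySem.List.enumerate_cons, List.map_cons, List.sum_cons]
      simp [pvRowOf, pvBillOf]

theorem pvRows_eq (eb : List Int) :
    (PySem.List.enumerate (eb.zip eb.tail) 1).map pvRowOf
      = (PySem.List.pyRange 0 ((eb.length : Int) - 1) 1).map (pvRow eb) := by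
  apply List.ext_getElem
  · simp [PySem.List.length_enumerate, PySem.List.length_pyRange_one, List.length_zip]
  · intro k hk1 hk2
    have hzl : (eb.zip eb.tail).length = eb.length - 1 := by
      simp [List.length_zip, List.length_tail]
    have hk : k < eb.length - 1 := by
      simpa [PySem.List.length_enumerate, hzl] using hk1
    have hk1' : k + 1 < eb.length := by omega
    have hk0 : k < eb.length := by omega
    simp only [List.getElem_map, PySem.List.getElem_enumerate, PySem.List.getElem_pyRange_one,
      List.getElem_zip, List.getElem_tail]
    have hu : eb[k + 1] - eb[k] =
        PySem.List.pyGetD eb (((0 : Int) + (k : Int)) + 1) 0 - PySem.List.pyGetD eb ((0 : Int) + (k : Int)) 0 := by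
      have h1 : ((0 : Int) + (k : Int)) + 1 = ((k + 1 : Nat) : Int) := by omega
      have h2 : ((0 : Int) + (k : Int)) = ((k : Nat) : Int) := by omega
      rw [h1, h2, PySem.List.pyGetD_natCast, PySem.List.pyGetD_natCast]
      simp [List.getD, hk1', hk0]
    simp only [pvRowOf, pvRow, pvRateB_mul]
    rw [← hu]
    have hm : (1 : Int) + (k : Int) = 0 + (k : Int) + 1 := by ring
    rw [hm]

theorem pvBills_eq (eb : List Int) :
    (eb.zip eb.tail).map pvBillOf
      = (PySem.List.pyRange 0 ((eb.length : Int) - 1) 1).map (pvTot eb) := by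
  apply List.ext_getElem
  · simp [PySem.List.length_pyRange_one, List.length_zip]
  · intro k hk1 hk2
    have hk : k < eb.length - 1 := by
      simpa [List.length_zip, List.length_tail] using hk1
    have hk1' : k + 1 < eb.length := by omega
    have hk0 : k < eb.length := by omega
    simp only [List.getElem_map, PySem.List.getElem_pyRange_one, List.getElem_zip,
      List.getElem_tail]
    have hu : eb[k + 1] - eb[k] =
        PySem.List.pyGetD eb (((0 : Int) + (k : Int)) + 1) 0 - PySem.List.pyGetD eb ((0 : Int) + (k : Int)) 0 := by
      have h1 : ((0 : Int) + (k : Int)) + 1 = ((k + 1 : Nat) : Int) := by omega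
      have h2 : ((0 : Int) + (k : Int)) = ((k : Nat) : Int) := by omega
      rw [h1, h2, PySem.List.pyGetD_natCast, PySem.List.pyGetD_natCast]
      simp [List.getD, hk1', hk0]
    simp only [pvBillOf, pvTot, pvRateB_mul]
    rw [← hu]
    split_ifs <;> omega

-- ===== VERDICT =====
theorem calculate_electricity_bill_spec : Claim_equal_calculate_electricity_bill := by
  intro cd _dom _pre
  unfold Spec_calculate_electricity_bill
  rw [pvA_eq]
  unfold calculate_electricity_bill_alt
  rw [pvWalk_spec]
  dsimp only
  rw [pvRows_eq, pvBills_eq]
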